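-- pv_equiv track=rewrite | github.com/jiiwang/DSA_coding_notes_Python | Python_code/graph_valid_tree_comp.py | generate_balanced_tree_edges
-- ===== SOURCE A (Python) =====
-- from collections import deque
--
-- def generate_balanced_tree_edges(n):
--     edges = []
--     queue = deque([0])
--     current_node = 1
--     while current_node < n:
--         parent = queue.popleft()
--         for _ in range(2):  # Each node will have up to 2 children
--             if current_node < n:
--                 edges.append((parent, current_node))
--                 queue.append(current_node)
--                 current_node += 1
--     return edges
-- ===== SOURCE B (Python) =====
-- def generate_balanced_tree_edges(n):
--     # In a complete binary tree laid out level by level, node i's parent is (i-1)//2;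
--     # the BFS emits edges exactly in order of the child index, so build the list directly.
--     return [((i - 1) // 2, i) for i in range(1, n)]
-- ===== Notes on version B (the rewrite author's own statement) =====
-- stated objective: simpler
-- what changed: Replaced the BFS with a deque and a per-parent child loop by a single comprehension over child indices computing each parent arithmetically as (i-1)//2.
import Mathlib
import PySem

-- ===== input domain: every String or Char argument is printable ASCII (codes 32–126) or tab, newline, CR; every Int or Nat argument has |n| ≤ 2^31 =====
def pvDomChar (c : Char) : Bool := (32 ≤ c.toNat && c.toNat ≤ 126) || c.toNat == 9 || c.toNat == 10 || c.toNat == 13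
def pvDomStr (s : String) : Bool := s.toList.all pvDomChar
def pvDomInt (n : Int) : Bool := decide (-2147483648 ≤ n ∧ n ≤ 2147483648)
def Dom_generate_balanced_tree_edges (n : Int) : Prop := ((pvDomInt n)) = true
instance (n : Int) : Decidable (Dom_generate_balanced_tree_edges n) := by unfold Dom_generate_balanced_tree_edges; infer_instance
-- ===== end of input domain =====

-- B replaces A's BFS queue by a direct comprehension computing each parent as (i-1)//2 (simpler).

-- ===== PORT A =====
-- while-loop of A; the inner 'for _ in range(2)' is unrolled into its two guarded bodies.
-- The '[]' queue branch is unreachable (the queue is nonempty whenever current_node < n):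
-- Python's popleft would raise there, but the state never arises from the initial call.
def pvLoopA (n : Int) (q : List Int) (c : Int) (edges : List (Int × Int)) :
    List (Int × Int) :=
  if _h : c < n then
    match q with
    | [] => edges
    | p :: rest =>
      if _h2 : c + 1 < n then
        pvLoopA n ((rest ++ [c]) ++ [c + 1]) (c + 2) ((edges ++ [(p, c)]) ++ [(p, c + 1)])
      else
        pvLoopA n (rest ++ [c]) (c + 1) (edges ++ [(p, c)])
  else edges
termination_by (n - c).toNat
decreasing_by all_goals omega

def generate_balanced_tree_edges (n : Int) : List (Int × Int) :=
  pvLoopA n [0] 1 []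

-- ===== PORT B =====
def generate_balanced_tree_edges_alt (n : Int) : List (Int × Int) :=
  (PySem.List.pyRange 1 n 1).map (fun i => (PySem.Int.floordiv (i - 1) 2, i))

-- ===== PRECONDITION & SPEC =====
def Spec_generate_balanced_tree_edges (n : Int) (out : List (Int × Int)) : Prop := out = generate_balanced_tree_edges_alt n
instance (n : Int) (out : List (Int × Int)) : Decidable (Spec_generate_balanced_tree_edges n out) := by unfold Spec_generate_balanced_tree_edges; infer_instance

-- ===== CLAIM (what is proved, stated in full; the proofs are below) =====
def Claim_equal_generate_balanced_tree_edges : Prop := ∀ (n : Int), Dom_generate_balanced_tree_edges n → Spec_generate_balanced_tree_edges n (generate_balanced_tree_edges n)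

-- ===== LEMMAS AND PROOFS =====

lemma pv_fd_even (k : Int) : PySem.Int.floordiv (2 * k) 2 = k := by
  rw [PySem.Int.floordiv_eq_iff_of_pos (by norm_num)]; omega

lemma pv_fd_odd (k : Int) : PySem.Int.floordiv (2 * k + 1) 2 = k := by
  rw [PySem.Int.floordiv_eq_iff_of_pos (by norm_num)]; omega

-- Loop invariant: when current_node = 2k+1, the queue holds exactly k..2k,
-- and the loop appends the edges ((i-1)//2, i) for i = 2k+1, …, n-1 in order.
lemma pvLoopA_inv (fuel : Nat) : ∀ (n k : Int), 0 ≤ k → (n - (2 * k + 1)).toNat ≤ fuel →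
    ∀ edges, pvLoopA n (PySem.List.pyRange k (2 * k + 1) 1) (2 * k + 1) edges
      = edges ++ (PySem.List.pyRange (2 * k + 1) n 1).map
          (fun i => (PySem.Int.floordiv (i - 1) 2, i)) := by
  induction fuel with
  | zero =>
    intro n k hk hf edges
    have h : ¬ (2 * k + 1 < n) := by omega
    rw [pvLoopA.eq_def, dif_neg h, PySem.List.pyRange_one_eq_nil (by omega)]
    simp
  | succ fuel ih =>
    intro n k hk hf edges
    by_cases h : 2 * k + 1 < n
    · rw [PySem.List.pyRange_one_cons (show k < 2 * k + 1 by omega)]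
      rw [pvLoopA.eq_def, dif_pos h]
      dsimp only
      by_cases h2 : 2 * k + 1 + 1 < n
      · rw [dif_pos h2]
        have hq : ((PySem.List.pyRange (k + 1) (2 * k + 1) 1 ++ [2 * k + 1]) ++ [2 * k + 1 + 1])
            = PySem.List.pyRange (k + 1) (2 * (k + 1) + 1) 1 := by
          rw [show (2 : Int) * (k + 1) + 1 = (2 * k + 2) + 1 by ring,
            PySem.List.pyRange_one_succ_right (by omega : (k : Int) + 1 ≤ 2 * k + 2),
            show (2 : Int) * k + 2 = (2 * k + 1) + 1 by ring,
            PySem.List.pyRange_one_succ_right (by omega : (k : Int) + 1 ≤ 2 * k + 1)]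
        have hc : (2 : Int) * k + 1 + 2 = 2 * (k + 1) + 1 := by ring
        rw [hq, hc, ih n (k + 1) (by omega) (by omega)]
        rw [PySem.List.pyRange_one_cons h,
          PySem.List.pyRange_one_cons (show (2 : Int) * k + 1 + 1 < n by omega)]
        simp only [List.map_cons, List.append_assoc]
        have e1 : (2 : Int) * k + 1 - 1 = 2 * k := by ring
        have e2 : (2 : Int) * k + 1 + 1 - 1 = 2 * k + 1 := by ring
        have e3 : (2 : Int) * k + 1 + 1 + 1 = 2 * (k + 1) + 1 := by ring
        rw [e1, e2, e3, pv_fd_even, pv_fd_odd]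
        simp
      · rw [dif_neg h2]
        have hq : PySem.List.pyRange (k + 1) (2 * k + 1) 1 ++ [2 * k + 1]
            = PySem.List.pyRange (k + 1) (2 * k + 1 + 1) 1 :=
          (PySem.List.pyRange_one_succ_right (by omega : (k : Int) + 1 ≤ 2 * k + 1)).symm
        rw [hq, pvLoopA.eq_def, dif_neg (show ¬ (2 * k + 1 + 1 < n) from h2)]
        rw [PySem.List.pyRange_one_cons h,
          PySem.List.pyRange_one_eq_nil (show n ≤ 2 * k + 1 + 1 by omega)]
        have e1 : (2 : Int) * k + 1 - 1 = 2 * k := by ring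
        simp [e1]
    · rw [pvLoopA.eq_def, dif_neg h, PySem.List.pyRange_one_eq_nil (by omega)]
      simp

-- ===== VERDICT (by name: the statement is the Claim_ definition above) =====
theorem generate_balanced_tree_edges_spec : Claim_equal_generate_balanced_tree_edges := by
  intro n _
  unfold Spec_generate_balanced_tree_edges generate_balanced_tree_edges
    generate_balanced_tree_edges_alt
  have h0 : [(0 : Int)] = PySem.List.pyRange 0 (2 * 0 + 1) 1 := by decide
  have h1 : (1 : Int) = 2 * 0 + 1 := by norm_num
  rw [h0]
  calc pvLoopA n (PySem.List.pyRange 0 (2 * 0 + 1) 1) 1 []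
      = pvLoopA n (PySem.List.pyRange 0 (2 * 0 + 1) 1) (2 * 0 + 1) [] := by rw [← h1]
    _ = [] ++ (PySem.List.pyRange (2 * 0 + 1) n 1).map
          (fun i => (PySem.Int.floordiv (i - 1) 2, i)) :=
        pvLoopA_inv (n - 1).toNat n 0 (by norm_num) (by omega) []
    _ = (PySem.List.pyRange 1 n 1).map (fun i => (PySem.Int.floordiv (i - 1) 2, i)) := by
        norm_num
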